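-- pv_equiv track=rewrite | github.com/mconnormoz/jydoop_bcolloran | scripts/search/searchDataExtraction_1_countsPerBin_osGeo.py | totalSearchDictFromSearchDaysData
-- ===== SOURCE A (Python) =====
-- def totalSearchDictFromSearchDaysData(searchDaysData):
--     searchCountTupList = [(key,searchCountDict[key]) for searchCountDict in searchDaysData for key in searchCountDict.keys() if key!="_v"]
--     totalSearchDict={}
--     for provider,count in searchCountTupList:
--         try:
--             totalSearchDict[provider]+=count
--         except KeyError:
--             totalSearchDict[provider]=count
--     return totalSearchDict
-- ===== SOURCE B (Python) =====
-- def totalSearchDictFromSearchDaysData(searchDaysData):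
--     if not searchDaysData:
--         return {}
--     total = {k: v for k, v in searchDaysData[0].items() if k != "_v"}
--     for k, v in totalSearchDictFromSearchDaysData(searchDaysData[1:]).items():
--         total[k] = total.get(k, 0) + v
--     return total
-- ===== Notes on version B (the rewrite author's own statement) =====
-- stated objective: alternative
-- what changed: Replaces A's flatten-all-days-then-accumulate counter loop by structural recursion on the day list: filter the first day's dict, recursively total the remaining days, and merge that recursive total into the head via get-then-set.
import Mathlib
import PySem

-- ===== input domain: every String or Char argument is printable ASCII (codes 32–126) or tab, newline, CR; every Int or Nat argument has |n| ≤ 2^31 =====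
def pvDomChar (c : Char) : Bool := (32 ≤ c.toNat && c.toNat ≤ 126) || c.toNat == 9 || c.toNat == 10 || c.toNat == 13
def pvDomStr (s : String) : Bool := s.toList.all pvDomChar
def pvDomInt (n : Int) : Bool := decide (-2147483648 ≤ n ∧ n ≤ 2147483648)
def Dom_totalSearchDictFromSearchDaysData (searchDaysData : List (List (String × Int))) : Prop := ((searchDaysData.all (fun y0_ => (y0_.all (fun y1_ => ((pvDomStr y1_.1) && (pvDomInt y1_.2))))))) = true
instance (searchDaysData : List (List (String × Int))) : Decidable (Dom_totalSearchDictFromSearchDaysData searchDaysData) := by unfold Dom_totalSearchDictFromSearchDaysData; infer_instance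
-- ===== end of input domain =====

-- B replaces A's flatten-then-accumulate counter loop by structural recursion on the day
-- list: filter the first day, recursively total the rest, merge the recursive total into
-- the head via get-then-set; an alternative decomposition, not claimed faster.

-- ===== PORT A =====
def totalSearchDictFromSearchDaysData (searchDaysData : List (List (String × Int))) : List (String × Int) :=
  -- searchCountTupList = [(key, scd[key]) for scd in searchDaysData for key in scd.keys() if key != "_v"]
  let searchCountTupList : List (String × Int) :=
    searchDaysData.flatMap (fun scd =>
      (((PySem.Dict.ofList scd).keys).filter (fun k => k != "_v")).map
        (fun k => (k, (PySem.Dict.ofList scd).getD k 0)))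
  -- try: d[p] += c  except KeyError: d[p] = c   ==  d.modify p 0 (· + c)
  (searchCountTupList.foldl
      (fun t pc => t.modify pc.1 0 (fun v => v + pc.2))
      PySem.Dict.empty).items

-- ===== PORT B =====
def totalSearchDictFromSearchDaysData_alt : List (List (String × Int)) → List (String × Int)
  | [] => []                                  -- if not searchDaysData: return {}
  | d :: rest =>
      -- total = {k: v for k, v in searchDaysData[0].items() if k != "_v"}
      let total : PySem.Dict String Int :=
        PySem.Dict.ofList (((PySem.Dict.ofList d).items).filter (fun kv => kv.1 != "_v"))
      -- for k, v in totalSearchDictFromSearchDaysData(searchDaysData[1:]).items():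
      --     total[k] = total.get(k, 0) + v
      ((totalSearchDictFromSearchDaysData_alt rest).foldl
          (fun t kv => t.insert kv.1 (t.getD kv.1 0 + kv.2)) total).items

-- ===== PRECONDITION & SPEC =====
def Spec_totalSearchDictFromSearchDaysData (searchDaysData : List (List (String × Int))) (out : List (String × Int)) : Prop := out = totalSearchDictFromSearchDaysData_alt searchDaysData
instance (searchDaysData : List (List (String × Int))) (out : List (String × Int)) : Decidable (Spec_totalSearchDictFromSearchDaysData searchDaysData out) := by unfold Spec_totalSearchDictFromSearchDaysData; infer_instance

-- ===== CLAIM (what is proved, stated in full; the proofs are below) =====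
def Claim_equal_totalSearchDictFromSearchDaysData : Prop := ∀ (searchDaysData : List (List (String × Int))), Dom_totalSearchDictFromSearchDaysData searchDaysData → Spec_totalSearchDictFromSearchDaysData searchDaysData (totalSearchDictFromSearchDaysData searchDaysData)

-- ===== LEMMAS AND PROOFS =====

-- the filtered key list of one day
def pvKeysF (d : List (String × Int)) : List String :=
  ((PySem.Dict.ofList d).keys).filter (fun k => k != "_v")

-- per-provider total across the days
def pvSum (sd : List (List (String × Int))) (p : String) : Int :=
  (sd.map (fun d => (PySem.Dict.ofList d).getD p 0)).sum

-- common normal form both ports are reduced to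
def pvN (sd : List (List (String × Int))) : List (String × Int) :=
  (PySem.Set.ofList (sd.flatMap pvKeysF)).map (fun p => (p, pvSum sd p))

-- sum of the counts attached to key p in a tuple list
def pvWsum (L : List (String × Int)) (p : String) : Int :=
  ((L.filter (fun pc => pc.1 == p)).map Prod.snd).sum

lemma pvWsum_append (L M : List (String × Int)) (p : String) :
    pvWsum (L ++ M) p = pvWsum L p + pvWsum M p := by
  simp [pvWsum]

-- A's counter loop computes pvWsum at every key
lemma pvFoldGetD (L : List (String × Int)) :
    ∀ (d : PySem.Dict String Int) (k : String),
      (L.foldl (fun t pc => t.modify pc.1 0 (fun v => v + pc.2)) d).getD k 0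
        = d.getD k 0 + pvWsum L k := by
  induction L with
  | nil => intro d k; simp [pvWsum]
  | cons pc rest ih =>
      intro d k
      simp only [List.foldl_cons, ih, PySem.Dict.getD_modify, pvWsum, List.filter_cons]
      by_cases h : k = pc.1
      · simp [h]; ring
      · have : (pc.1 == k) = false := by simp [Ne.symm h]
        simp [h, this]

-- B's merge loop computes pvWsum at every key, too
lemma pvFoldInsGetD (L : List (String × Int)) :
    ∀ (d : PySem.Dict String Int) (k : String),
      (L.foldl (fun t kv => t.insert kv.1 (t.getD kv.1 0 + kv.2)) d).getD k 0
        = d.getD k 0 + pvWsum L k := by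
  induction L with
  | nil => intro d k; simp [pvWsum]
  | cons pc rest ih =>
      intro d k
      simp only [List.foldl_cons, ih, PySem.Dict.getD_insert, pvWsum, List.filter_cons]
      by_cases h : k = pc.1
      · simp [h]; ring
      · have : (pc.1 == k) = false := by simp [Ne.symm h]
        simp [h, this]

-- a Nodup list filtered at one element
lemma pvFilterNodup {α : Type} [BEq α] [LawfulBEq α] (ks : List α) (p : α) (h : ks.Nodup) :
    ks.filter (fun k => k == p) = if p ∈ ks then [p] else [] := by
  induction ks with
  | nil => simp
  | cons a t ih =>
      have ht : t.Nodup := h.of_cons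
      by_cases hap : a = p
      · subst hap
        have hna : a ∉ t := (List.nodup_cons.mp h).1
        simp [ih ht, hna]
      · have hf : (a == p) = false := by simp [hap]
        have hpa : p ≠ a := fun e => hap e.symm
        simp [hf, ih ht, hpa]

-- a day that does not list p (p ≠ "_v") contributes 0
lemma pvDayZero (d : List (String × Int)) (p : String)
    (hm : p ∉ pvKeysF d) (hp : p ≠ "_v") :
    (PySem.Dict.ofList d).getD p 0 = 0 := by
  have hpk : p ∉ (PySem.Dict.ofList d).keys := by
    intro hk
    exact hm (List.mem_filter.mpr ⟨hk, by simp [hp]⟩)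
  have hc : (PySem.Dict.ofList d).contains p = false := by
    by_contra hcc
    exact hpk ((PySem.Dict.contains_iff_mem_keys _ _).mp (by simpa using hcc))
  exact PySem.Dict.getD_of_not_contains _ _ hc

-- one day's contribution to pvWsum is exactly d.get(p, 0), for p ≠ "_v"
lemma pvDayWsum (d : List (String × Int)) (p : String) (hp : p ≠ "_v") :
    pvWsum ((pvKeysF d).map (fun k => (k, (PySem.Dict.ofList d).getD k 0))) p
      = (PySem.Dict.ofList d).getD p 0 := by
  have hnd : (pvKeysF d).Nodup := (PySem.Dict.nodup_keys_ofList d).filter _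
  simp only [pvWsum, List.filter_map]
  have hcomp : ((fun pc : String × Int => pc.1 == p) ∘
      (fun k => (k, (PySem.Dict.ofList d).getD k 0))) = fun k => k == p := rfl
  rw [hcomp, pvFilterNodup _ _ hnd]
  by_cases hm : p ∈ pvKeysF d
  · simp [hm]
  · simp [hm, pvDayZero d p hm hp]

-- pvWsum over the flattened tuple list = per-provider sum over days, for p ≠ "_v"
lemma pvWsumDays (sd : List (List (String × Int))) (p : String) (hp : p ≠ "_v") :
    pvWsum (sd.flatMap (fun scd =>
        (pvKeysF scd).map (fun k => (k, (PySem.Dict.ofList scd).getD k 0)))) p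
      = pvSum sd p := by
  induction sd with
  | nil => simp [pvWsum, pvSum]
  | cons d rest ih =>
      simp only [List.flatMap_cons, pvWsum_append, ih, pvDayWsum d p hp, pvSum,
        List.map_cons, List.sum_cons]

-- PORT A equals the normal form
lemma pvA_eq_pvN (sd : List (List (String × Int))) :
    totalSearchDictFromSearchDaysData sd = pvN sd := by
  unfold totalSearchDictFromSearchDaysData pvN
  set L := sd.flatMap (fun scd =>
      (((PySem.Dict.ofList scd).keys).filter (fun k => k != "_v")).map
        (fun k => (k, (PySem.Dict.ofList scd).getD k 0))) with hL
  set F := L.foldl (fun t pc => t.modify pc.1 0 (fun v => v + pc.2)) PySem.Dict.empty with hF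
  have hkeys : F.keys = PySem.Set.ofList (L.map Prod.fst) := by
    rw [hF, PySem.Dict.keys_foldl_modify_key L Prod.fst 0 (fun _ pc v => v + pc.2)]
    rfl
  have hnd : F.keys.Nodup := by
    rw [hkeys]; exact PySem.Set.nodup_ofList _
  rw [PySem.Dict.items_eq_map_keys F hnd 0, hkeys]
  have hmapfst : L.map Prod.fst = sd.flatMap pvKeysF := by
    rw [hL, List.map_flatMap]
    simp [Function.comp_def]
    rfl
  rw [hmapfst]
  apply List.map_congr_left
  intro p hpmem
  have hp : p ≠ "_v" := by
    have := (PySem.Set.mem_ofList _ p).mp hpmem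
    obtain ⟨d, _, hpd⟩ := List.mem_flatMap.mp this
    have := (List.mem_filter.mp hpd).2
    simpa [pvKeysF] using this
  have := pvFoldGetD L PySem.Dict.empty p
  rw [PySem.Dict.getD_empty, zero_add] at this
  rw [hF] at *
  rw [this, hL]
  exact congrArg _ (pvWsumDays sd p hp)

-- a pair list with distinct keys rebuilds to itself
lemma pvOfListNodup (L : List (String × Int)) (h : (L.map Prod.fst).Nodup) :
    (PySem.Dict.ofList L).items = L := by
  have := PySem.Dict.items_foldl_insert_fresh (d := (PySem.Dict.empty : PySem.Dict String Int))
    (l := L) (k := Prod.fst) (v := Prod.snd) (by intro a _; simp) h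
  simpa using this

-- the head day's filtered dict: items and keys
lemma pvHeadItems (d : List (String × Int)) :
    (PySem.Dict.ofList (((PySem.Dict.ofList d).items).filter (fun kv => kv.1 != "_v"))).items
      = (pvKeysF d).map (fun k => (k, (PySem.Dict.ofList d).getD k 0)) := by
  have hitems : ((PySem.Dict.ofList d).items).filter (fun kv => kv.1 != "_v")
      = (pvKeysF d).map (fun k => (k, (PySem.Dict.ofList d).getD k 0)) := by
    rw [PySem.Dict.items_eq_map_keys _ (PySem.Dict.nodup_keys_ofList d) 0, List.filter_map]
    rfl
  rw [hitems]
  apply pvOfListNodup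
  simpa [Function.comp_def] using (PySem.Dict.nodup_keys_ofList d).filter (fun k => k != "_v")

-- filter of keys is Nodup
lemma pvKeysF_nodup (d : List (String × Int)) : (pvKeysF d).Nodup :=
  (PySem.Dict.nodup_keys_ofList d).filter _

-- pvWsum of the normal form at p ≠ "_v" is the per-provider sum
lemma pvWsum_pvN (sd : List (List (String × Int))) (p : String) (hp : p ≠ "_v") :
    pvWsum (pvN sd) p = pvSum sd p := by
  unfold pvN
  simp only [pvWsum, List.filter_map]
  have hcomp : ((fun pc : String × Int => pc.1 == p) ∘ (fun q => (q, pvSum sd q)))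
      = fun q => q == p := rfl
  rw [hcomp, pvFilterNodup _ _ (PySem.Set.nodup_ofList _)]
  by_cases hm : p ∈ PySem.Set.ofList (sd.flatMap pvKeysF)
  · simp [hm]
  · have hnm : p ∉ sd.flatMap pvKeysF := fun hc => hm ((PySem.Set.mem_ofList _ p).mpr hc)
    have hz : pvSum sd p = 0 := by
      unfold pvSum
      apply List.sum_eq_zero
      intro x hx
      obtain ⟨d, hd, rfl⟩ := List.mem_map.mp hx
      exact pvDayZero d p (fun hk => hnm (List.mem_flatMap.mpr ⟨d, hd, hk⟩)) hp
    simp [hm, hz]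

-- Set.update ignores deduplication of its second argument
lemma pvUpdate_ofList {α : Type} [BEq α] [LawfulBEq α] (s : PySem.Set α) (xs : List α) :
    PySem.Set.update s (PySem.Set.ofList xs) = PySem.Set.update s xs := by
  rw [PySem.Set.update_eq_append_filter, PySem.Set.update_eq_append_filter,
    PySem.Set.ofList_ofList]

-- every key of the normal form avoids "_v"
lemma pvN_key_ne (sd : List (List (String × Int))) (p : String)
    (hm : p ∈ PySem.Set.ofList (sd.flatMap pvKeysF)) : p ≠ "_v" := by
  have := (PySem.Set.mem_ofList _ p).mp hm
  obtain ⟨d, _, hpd⟩ := List.mem_flatMap.mp this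
  have := (List.mem_filter.mp hpd).2
  simpa [pvKeysF] using this

-- PORT B equals the normal form
lemma pvB_eq_pvN (sd : List (List (String × Int))) :
    totalSearchDictFromSearchDaysData_alt sd = pvN sd := by
  induction sd with
  | nil => simp [totalSearchDictFromSearchDaysData_alt, pvN]
  | cons d rest ih =>
      unfold totalSearchDictFromSearchDaysData_alt
      rw [ih]
      set T0 := PySem.Dict.ofList (((PySem.Dict.ofList d).items).filter (fun kv => kv.1 != "_v")) with hT0
      set Tm := (pvN rest).foldl (fun t kv => t.insert kv.1 (t.getD kv.1 0 + kv.2)) T0 with hTm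
      have hT0keys : T0.keys = pvKeysF d := by
        show T0.items.map Prod.fst = _
        rw [hT0, pvHeadItems, List.map_map]
        simp [Function.comp_def]
      have hNfst : (pvN rest).map Prod.fst = PySem.Set.ofList (rest.flatMap pvKeysF) := by
        unfold pvN; rw [List.map_map]; simp [Function.comp_def]
      have hkeys : Tm.keys = PySem.Set.ofList ((d :: rest).flatMap pvKeysF) := by
        rw [hTm, PySem.Dict.keys_foldl_insert_key (pvN rest) Prod.fst
          (fun t kv => t.getD kv.1 0 + kv.2) T0, hNfst, hT0keys, pvUpdate_ofList,
          List.flatMap_cons, PySem.Set.ofList_append,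
          PySem.Set.ofList_eq_self_of_nodup _ (pvKeysF_nodup d)]
      have hnd : Tm.keys.Nodup := by
        rw [hkeys]; exact PySem.Set.nodup_ofList _
      rw [PySem.Dict.items_eq_map_keys Tm hnd 0, hkeys]
      unfold pvN
      apply List.map_congr_left
      intro p hpmem
      have hp : p ≠ "_v" := pvN_key_ne _ p hpmem
      have hstep := pvFoldInsGetD (pvN rest) T0 p
      rw [← hTm] at hstep
      have hT0p : T0.getD p 0 = (PySem.Dict.ofList d).getD p 0 := by
        by_cases hk : p ∈ pvKeysF d
        · have hpair : (p, (PySem.Dict.ofList d).getD p 0) ∈ T0.items := by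
            rw [hT0, pvHeadItems]
            exact List.mem_map.mpr ⟨p, hk, rfl⟩
          have hndT0 : T0.keys.Nodup := by rw [hT0keys]; exact pvKeysF_nodup d
          exact PySem.Dict.getD_of_mem_items T0 hpair hndT0 0
        · have hc : T0.contains p = false := by
            rw [PySem.Dict.contains_eq_decide_mem_keys, hT0keys]
            simp [hk]
          rw [PySem.Dict.getD_of_not_contains _ _ hc, pvDayZero d p hk hp]
      rw [hstep, hT0p, pvWsum_pvN rest p hp]
      show _ = (p, pvSum (d :: rest) p)
      unfold pvSum
      simp

-- ===== VERDICT (by name: the statement is the Claim_ definition above) =====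
theorem totalSearchDictFromSearchDaysData_spec : Claim_equal_totalSearchDictFromSearchDaysData := by
  intro sd _
  unfold Spec_totalSearchDictFromSearchDaysData
  rw [pvA_eq_pvN, pvB_eq_pvN]
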